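-- pv_equiv track=rewrite | github.com/Marchell0o0/CTU_homeworks | ALP/Homeworks/05_Chess_evaluation.py | check_down_right
-- ===== SOURCE A (Python) =====
-- def check_down_right(lct, brd):
--     distance = 0
--     for cr in range(1, 8):
--         if lct[0] + cr > 7 or lct[1] + cr > 7:
--             return False, 0
--         enemy = brd[lct[0] + cr][lct[1] + cr]
--         if enemy == 2 or enemy == 4:
--             return True, 0
--         if distance == 0 and enemy == 6:
--             return True, 1
--         if enemy != 0:
--             return False, 0
--         distance += 1
--     return False, 0
-- ===== SOURCE B (Python) =====
-- def check_down_right(lct, brd):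
--     # Gather the down-right diagonal cells, stopping at the board edge or
--     # at (and including) the first occupied cell, which blocks the line.
--     cells = []
--     for cr in range(1, 8):
--         r, c = lct[0] + cr, lct[1] + cr
--         if r > 7 or c > 7:
--             break
--         piece = brd[r][c]
--         cells.append(piece)
--         if piece != 0:
--             break
--     # Find the first occupied cell and its distance index.
--     hit = next(((i, p) for i, p in enumerate(cells) if p != 0), None)
--     if hit is None:
--         return False, 0
--     i, p = hit
--     # Classify that single piece.
--     if p in (2, 4):
--         return True, 0
--     if p == 6 and i == 0:
--         return True, 1
--     return False, 0
-- ===== Notes on version B (the rewrite author's own statement) =====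
-- stated objective: alternative
-- what changed: Replaces A's single interleaved loop with a distance accumulator by a gather-then-find-first-then-classify decomposition: collect the clipped diagonal up to the first blocker, locate that first non-empty cell with its index, then classify it in one place.
import Mathlib
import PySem

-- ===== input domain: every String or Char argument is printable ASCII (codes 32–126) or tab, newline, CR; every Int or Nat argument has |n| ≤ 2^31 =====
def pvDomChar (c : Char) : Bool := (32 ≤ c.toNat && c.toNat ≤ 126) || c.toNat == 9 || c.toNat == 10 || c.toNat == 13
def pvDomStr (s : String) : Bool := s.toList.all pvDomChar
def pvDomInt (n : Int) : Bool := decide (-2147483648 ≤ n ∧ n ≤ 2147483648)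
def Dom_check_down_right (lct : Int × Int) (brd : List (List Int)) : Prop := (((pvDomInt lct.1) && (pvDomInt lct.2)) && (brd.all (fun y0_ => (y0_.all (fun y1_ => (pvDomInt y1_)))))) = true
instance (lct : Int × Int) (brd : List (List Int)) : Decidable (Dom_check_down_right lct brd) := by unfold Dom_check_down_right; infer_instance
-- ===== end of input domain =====

-- B replaces A's interleaved loop (with a distance accumulator) by a
-- gather-then-find-first-then-classify decomposition; same cost, same values.

-- ===== PORT A =====
-- brd[r][c] with Python (possibly negative) indexing; none = IndexError
def pvCell (brd : List (List Int)) (r c : Int) : Option Int :=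
  (PySem.List.pyGet? brd r).bind (fun row => PySem.List.pyGet? row c)

-- the 'for cr in range(1, 8)' loop of A, state = distance
def pvLoopA (lct : Int × Int) (brd : List (List Int)) : List Int → Int → Bool × Int
  | [], _ => (false, 0)
  | cr :: rest, distance =>
    if lct.1 + cr > 7 ∨ lct.2 + cr > 7 then (false, 0)
    else
      match pvCell brd (lct.1 + cr) (lct.2 + cr) with
      | none => (false, 0)  -- IndexError in Python; excluded by Pre_
      | some enemy =>
        if enemy = 2 ∨ enemy = 4 then (true, 0)
        else if distance = 0 ∧ enemy = 6 then (true, 1)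
        else if enemy ≠ 0 then (false, 0)
        else pvLoopA lct brd rest (distance + 1)

def check_down_right (lct : Int × Int) (brd : List (List Int)) : Bool × Int :=
  pvLoopA lct brd (PySem.List.pyRange 1 8 1) 0

-- ===== PORT B =====
-- gather the clipped diagonal up to (and including) the first blocker
def pvGather (lct : Int × Int) (brd : List (List Int)) : List Int → List Int
  | [] => []
  | cr :: rest =>
    if lct.1 + cr > 7 ∨ lct.2 + cr > 7 then []
    else
      match pvCell brd (lct.1 + cr) (lct.2 + cr) with
      | none => []  -- IndexError in Python; excluded by Pre_
      | some piece => if piece ≠ 0 then [piece] else piece :: pvGather lct brd rest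

-- next(((i, p) for i, p in enumerate(cells) if p != 0), None)
def pvFindHit : Int → List Int → Option (Int × Int)
  | _, [] => none
  | i, p :: rest => if p ≠ 0 then some (i, p) else pvFindHit (i + 1) rest

def check_down_right_alt (lct : Int × Int) (brd : List (List Int)) : Bool × Int :=
  match pvFindHit 0 (pvGather lct brd (PySem.List.pyRange 1 8 1)) with
  | none => (false, 0)
  | some (i, p) =>
    if p = 2 ∨ p = 4 then (true, 0)
    else if p = 6 ∧ i = 0 then (true, 1)
    else (false, 0)

-- ===== PRECONDITION & SPEC =====
-- Pre_ excludes exactly the inputs where A raises IndexError: some step cr of the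
-- diagonal is inside the 0..7 bounds, all earlier steps hold empty (0) cells, yet
-- brd[lct[0]+cr][lct[1]+cr] is out of range under Python indexing.
def Pre_check_down_right (lct : Int × Int) (brd : List (List Int)) : Prop :=
  ∀ cr ∈ PySem.List.pyRange 1 8 1,
    (lct.1 + cr ≤ 7 ∧ lct.2 + cr ≤ 7 ∧
      ∀ j ∈ PySem.List.pyRange 1 cr 1, pvCell brd (lct.1 + j) (lct.2 + j) = some 0) →
    (pvCell brd (lct.1 + cr) (lct.2 + cr)).isSome
instance (lct : Int × Int) (brd : List (List Int)) : Decidable (Pre_check_down_right lct brd) := by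
  unfold Pre_check_down_right; infer_instance

def pvWitness_check_down_right : (Int × Int) × List (List Int) :=
  ((4, 4), [[0,0,0,0,0,0,0,0],[0,0,0,0,0,0,0,0],[0,0,0,0,0,0,0,0],[0,0,0,0,0,0,0,0],
            [0,0,0,0,0,0,0,0],[0,0,0,0,0,0,0,0],[0,0,0,0,0,0,4,0],[0,0,0,0,0,0,0,2]])

def Spec_check_down_right (lct : Int × Int) (brd : List (List Int)) (out : Bool × Int) : Prop := out = check_down_right_alt lct brd
instance (lct : Int × Int) (brd : List (List Int)) (out : Bool × Int) : Decidable (Spec_check_down_right lct brd out) := by unfold Spec_check_down_right; infer_instance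

-- ===== CLAIM (what is proved, stated in full; the proofs are below) =====
def Claim_equal_check_down_right : Prop := ∀ (lct : Int × Int) (brd : List (List Int)), Dom_check_down_right lct brd → Pre_check_down_right lct brd → Spec_check_down_right lct brd (check_down_right lct brd)

-- ===== LEMMAS AND PROOFS =====

-- A's interleaved loop equals B's gather/find-first/classify pipeline, for any
-- step list and any starting distance (the two ports agree on ALL inputs).
theorem pvLoopA_eq (lct : Int × Int) (brd : List (List Int)) :
    ∀ (L : List Int) (d : Int),
      pvLoopA lct brd L d =
        (match pvFindHit d (pvGather lct brd L) with
         | none => (false, 0)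
         | some (i, p) =>
           if p = 2 ∨ p = 4 then (true, 0)
           else if p = 6 ∧ i = 0 then (true, 1)
           else (false, 0)) := by
  intro L
  induction L with
  | nil => intro d; simp [pvLoopA, pvGather, pvFindHit]
  | cons cr rest ih =>
    intro d
    by_cases hb : lct.1 + cr > 7 ∨ lct.2 + cr > 7
    · simp [pvLoopA, pvGather, hb, pvFindHit]
    · rcases hc : pvCell brd (lct.1 + cr) (lct.2 + cr) with _ | enemy
      · simp [pvLoopA, pvGather, hb, hc, pvFindHit]
      · by_cases h24 : enemy = 2 ∨ enemy = 4
        · have hne : enemy ≠ 0 := by rcases h24 with h | h <;> omega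
          simp [pvLoopA, pvGather, hb, hc, h24, hne, pvFindHit]
        · by_cases h6 : d = 0 ∧ enemy = 6
          · have hne : enemy ≠ 0 := by omega
            simp [pvLoopA, pvGather, hb, hc, h24, h6, pvFindHit]
          · by_cases hz : enemy = 0
            · simp [pvLoopA, pvGather, hb, hc, hz, pvFindHit, ih]
            · simp [pvLoopA, pvGather, hb, hc, h24, hz, pvFindHit]
              simp [h6, fun h hd => h6 ⟨hd, h⟩, and_comm]

-- ===== VERDICT (by name: the statement is the Claim_ definition above) =====
theorem check_down_right_spec : Claim_equal_check_down_right := by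
  intro lct brd _ _
  unfold Spec_check_down_right check_down_right check_down_right_alt
  exact pvLoopA_eq lct brd (PySem.List.pyRange 1 8 1) 0
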